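-- pv_equiv track=rewrite | github.com/CahootsMalone/sentient-stuff | scripts/sentient-misc-database-text-parser.py | generate_link_text
-- ===== SOURCE A (Python) =====
-- LINK_INVALID = 65535 # If this is a link destination, no link appears at the corresponding security clearance level.
--
-- def generate_link_text(link_name, link_list):
--
--     link_text = ""
--
--     added_first_link = False
--
--     for link_index in range(len(link_list)):
--         link = link_list[link_index]
--         if link != LINK_INVALID:
--             if not added_first_link:
--                 link_text += '<a href="' + str(link) + '.html">' + f"{link_name} L{str(link_index + 1)}" + '</a>'
--                 added_first_link = True
--             else:
--                 link_text += ' <a href="' + str(link) + '.html">' + f"L{str(link_index + 1)}" + '</a>'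
--
--     return link_text
-- ===== SOURCE B (Python) =====
-- LINK_INVALID = 65535
--
-- def generate_link_text(link_name, link_list):
--     # Pass 1: keep the indices and values of the valid links.
--     valid = [(i, link) for i, link in enumerate(link_list) if link != LINK_INVALID]
--     if not valid:
--         return ""
--     # Pass 2: format each valid link; the first one (by position) carries the name.
--     first_i, first_link = valid[0]
--     pieces = ['<a href="' + str(first_link) + '.html">' + f"{link_name} L{str(first_i + 1)}" + '</a>']
--     for i, link in valid[1:]:
--         pieces.append('<a href="' + str(link) + '.html">' + f"L{str(i + 1)}" + '</a>')
--     return ' '.join(pieces)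
-- ===== Notes on version B (the rewrite author's own statement) =====
-- stated objective: alternative
-- what changed: Replaces the single loop with an added_first_link flag and in-place string concatenation by a filter-then-format decomposition: one pass collects (index, link) pairs of valid links, a second pass formats the first pair (with the name) and the rest, joined by spaces.
import Mathlib
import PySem

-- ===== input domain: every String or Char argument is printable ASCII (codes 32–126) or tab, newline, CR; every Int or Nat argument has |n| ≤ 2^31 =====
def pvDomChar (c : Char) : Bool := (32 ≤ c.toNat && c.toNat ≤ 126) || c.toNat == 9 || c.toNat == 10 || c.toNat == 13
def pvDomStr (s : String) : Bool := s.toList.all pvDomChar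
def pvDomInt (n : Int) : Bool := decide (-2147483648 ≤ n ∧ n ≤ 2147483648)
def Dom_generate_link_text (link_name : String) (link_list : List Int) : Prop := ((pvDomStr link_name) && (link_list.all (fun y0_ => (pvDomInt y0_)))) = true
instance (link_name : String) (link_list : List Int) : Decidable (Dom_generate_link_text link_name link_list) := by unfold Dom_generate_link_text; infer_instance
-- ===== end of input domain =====

-- B replaces A's flag-and-concatenate loop by a filter-then-format decomposition (same cost, different structure).


-- ===== PORT A =====
def generate_link_text (link_name : String) (link_list : List Int) : String :=
  let st := (PySem.List.pyRange 0 (link_list.length : Int) 1).foldl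
    (fun (st : List Char × Bool) link_index =>
      let link := PySem.List.pyGetD link_list link_index 0
      if link ≠ 65535 then
        if st.2 = false then
          (st.1 ++ ("<a href=\"".toList ++ PySem.Int.toChars link ++ ".html\">".toList ++
            (link_name.toList ++ " L".toList ++ PySem.Int.toChars (link_index + 1)) ++ "</a>".toList), true)
        else
          (st.1 ++ (" <a href=\"".toList ++ PySem.Int.toChars link ++ ".html\">".toList ++
            ("L".toList ++ PySem.Int.toChars (link_index + 1)) ++ "</a>".toList), st.2)
      else st)
    ([], false)
  String.ofList st.1

-- ===== PORT B =====
-- B-side helper: the valid (index, link) pairs (Source B's first pass)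
def pvValid (link_list : List Int) : List (Int × Int) :=
  (PySem.List.enumerate link_list 0).filter (fun p => p.2 ≠ 65535)

def pvAnchor (link : Int) (inner : List Char) : List Char :=
  "<a href=\"".toList ++ PySem.Int.toChars link ++ ".html\">".toList ++ inner ++ "</a>".toList

def generate_link_text_alt (link_name : String) (link_list : List Int) : String :=
  let valid := pvValid link_list
  match valid with
  | [] => ""
  | (i, link) :: rest =>
    let pieces := pvAnchor link (link_name.toList ++ " L".toList ++ PySem.Int.toChars (i + 1)) ::
      rest.map (fun p => pvAnchor p.2 ("L".toList ++ PySem.Int.toChars (p.1 + 1)))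
    String.ofList (PySem.Chars.join " ".toList pieces)

-- ===== PRECONDITION & SPEC =====
def Spec_generate_link_text (link_name : String) (link_list : List Int) (out : String) : Prop := out = generate_link_text_alt link_name link_list
instance (link_name : String) (link_list : List Int) (out : String) : Decidable (Spec_generate_link_text link_name link_list out) := by unfold Spec_generate_link_text; infer_instance

-- ===== CLAIM (what is proved, stated in full; the proofs are below) =====
def Claim_equal_generate_link_text : Prop := ∀ (link_name : String) (link_list : List Int), Dom_generate_link_text link_name link_list → Spec_generate_link_text link_name link_list (generate_link_text link_name link_list)

-- ===== LEMMAS AND PROOFS =====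

-- the rendering of a valid list as characters, in A's shape
def pvRender (link_name : String) : List (Int × Int) → List Char
  | [] => []
  | (i, link) :: rest =>
      pvAnchor link (link_name.toList ++ " L".toList ++ PySem.Int.toChars (i + 1)) ++
      rest.flatMap (fun p => ' ' :: pvAnchor p.2 ("L".toList ++ PySem.Int.toChars (p.1 + 1)))

lemma enumerate_append_singleton {α : Type} (xs : List α) (x : α) (s : Int) :
    PySem.List.enumerate (xs ++ [x]) s = PySem.List.enumerate xs s ++ [(s + xs.length, x)] := by
  induction xs generalizing s with
  | nil => simp [PySem.List.enumerate_cons]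
  | cons y ys ih =>
      simp [PySem.List.enumerate_cons, ih (s + 1)]
      omega

lemma join_space_cons (a : List Char) (l : List (List Char)) :
    PySem.Chars.join " ".toList (a :: l) = a ++ l.flatMap (fun p => ' ' :: p) := by
  induction l generalizing a with
  | nil => simp [PySem.Chars.join_singleton]
  | cons b rest ih =>
      rw [PySem.Chars.join_cons_cons, ih b]
      simp

lemma pvRender_append_valid (name : String) (v : List (Int × Int)) (n x : Int) (hv : v ≠ []) :
    pvRender name (v ++ [(n, x)]) =
      pvRender name v ++ (' ' :: pvAnchor x ("L".toList ++ PySem.Int.toChars (n + 1))) := by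
  obtain ⟨⟨i, l⟩, rest, rfl⟩ := List.exists_cons_of_ne_nil hv
  simp [pvRender]

-- A's loop state equals (rendered valid list, non-emptiness flag)
lemma loopA_eq (name : String) (xs : List Int) :
    (PySem.List.pyRange 0 (xs.length : Int) 1).foldl
      (fun (st : List Char × Bool) link_index =>
        let link := PySem.List.pyGetD xs link_index 0
        if link ≠ 65535 then
          if st.2 = false then
            (st.1 ++ ("<a href=\"".toList ++ PySem.Int.toChars link ++ ".html\">".toList ++
              (name.toList ++ " L".toList ++ PySem.Int.toChars (link_index + 1)) ++ "</a>".toList), true)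
          else
            (st.1 ++ (" <a href=\"".toList ++ PySem.Int.toChars link ++ ".html\">".toList ++
              ("L".toList ++ PySem.Int.toChars (link_index + 1)) ++ "</a>".toList), st.2)
        else st)
      ([], false)
    = (pvRender name (pvValid xs), !(pvValid xs).isEmpty) := by
  induction xs using List.reverseRecOn with
  | nil => simp [pvValid, pvRender, PySem.List.enumerate]
  | append_singleton ys x ih =>
      have hlen : ((ys ++ [x]).length : Int) = (ys.length : Int) + 1 := by
        simp only [List.length_append, List.length_cons, List.length_nil]
        push_cast
        omega
      rw [hlen, PySem.List.pyRange_one_succ_right (by positivity), List.foldl_append]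
      have hcongr : ∀ (acc : List Char × Bool), ∀ j ∈ PySem.List.pyRange 0 (ys.length : Int) 1,
          (fun (st : List Char × Bool) link_index =>
            let link := PySem.List.pyGetD (ys ++ [x]) link_index 0
            if link ≠ 65535 then
              if st.2 = false then
                (st.1 ++ ("<a href=\"".toList ++ PySem.Int.toChars link ++ ".html\">".toList ++
                  (name.toList ++ " L".toList ++ PySem.Int.toChars (link_index + 1)) ++ "</a>".toList), true)
              else
                (st.1 ++ (" <a href=\"".toList ++ PySem.Int.toChars link ++ ".html\">".toList ++
                  ("L".toList ++ PySem.Int.toChars (link_index + 1)) ++ "</a>".toList), st.2)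
            else st) acc j
          = (fun (st : List Char × Bool) link_index =>
            let link := PySem.List.pyGetD ys link_index 0
            if link ≠ 65535 then
              if st.2 = false then
                (st.1 ++ ("<a href=\"".toList ++ PySem.Int.toChars link ++ ".html\">".toList ++
                  (name.toList ++ " L".toList ++ PySem.Int.toChars (link_index + 1)) ++ "</a>".toList), true)
              else
                (st.1 ++ (" <a href=\"".toList ++ PySem.Int.toChars link ++ ".html\">".toList ++
                  ("L".toList ++ PySem.Int.toChars (link_index + 1)) ++ "</a>".toList), st.2)
            else st) acc j := by
        intro acc j hj
        rw [PySem.List.mem_pyRange_one] at hj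
        have hget : PySem.List.pyGetD (ys ++ [x]) j 0 = PySem.List.pyGetD ys j 0 := by
          rw [PySem.List.pyGetD_eq_getElem (ys ++ [x]) 0 hj.1 (by simp; omega),
              PySem.List.pyGetD_eq_getElem ys 0 hj.1 (by exact_mod_cast hj.2),
              List.getElem_append_left]
        simp only [hget]
      rw [PySem.List.foldl_congr_mem _ _ _ _ hcongr, ih]
      have hgetx : PySem.List.pyGetD (ys ++ [x]) (ys.length : Int) 0 = x := by
        rw [PySem.List.pyGetD_eq_getElem (ys ++ [x]) 0 (by positivity) (by simp)]
        simp
      have hvalid : pvValid (ys ++ [x]) =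
          pvValid ys ++ (if x ≠ 65535 then [((ys.length : Int), x)] else []) := by
        simp only [pvValid, enumerate_append_singleton, List.filter_append]
        by_cases hx : x = 65535 <;> simp [hx]
      by_cases hx : x = 65535
      · subst hx
        simp at hvalid
        simp [hgetx, hvalid]
      · rw [hvalid, if_pos hx]
        by_cases hv : pvValid ys = []
        · simp [hgetx, hx, hv, pvRender, pvAnchor]
        · have h1 : (!(pvValid ys).isEmpty) = true := by
            simp [hv]
          rw [pvRender_append_valid name _ _ _ hv]
          simp [hgetx, hx, h1, pvAnchor, hv]

-- ===== VERDICT (by name: the statement is the Claim_ definition above) =====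
theorem generate_link_text_spec : Claim_equal_generate_link_text := by
  intro name xs _
  show generate_link_text name xs = generate_link_text_alt name xs
  unfold generate_link_text generate_link_text_alt
  rw [loopA_eq name xs]
  show String.ofList (pvRender name (pvValid xs)) = _
  rcases hv : pvValid xs with _ | ⟨⟨i, l⟩, rest⟩
  · simp [pvRender]
  · show String.ofList (pvRender name ((i, l) :: rest)) =
      String.ofList (PySem.Chars.join " ".toList
        (pvAnchor l (name.toList ++ " L".toList ++ PySem.Int.toChars (i + 1)) ::
          rest.map (fun p => pvAnchor p.2 ("L".toList ++ PySem.Int.toChars (p.1 + 1)))))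
    rw [join_space_cons]
    simp [pvRender, pvAnchor, List.flatMap_map]
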